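-- pv_equiv track=rewrite | github.com/punkyfer/uva-programming-challenges | chapter 11/unidirectional_tsp.py | memoized_tsp
-- ===== SOURCE A (Python) =====
-- def build_path(row, cost):
--   path = [row]
--   for j in range(len(cost[0])-1):
--     prow = path[-1]-1
--     if prow == 0:
--       values = [cost[prow][j+1], cost[prow+1][j+1], cost[len(cost)-1][j+1]]
--       index_min = min(range(len(values)), key=values.__getitem__)
--       if index_min == 2:
--         trow = len(cost)-1
--       else:
--         trow = prow + index_min
--     elif prow == len(cost)-1:
--       values = [cost[0][j+1], cost[prow-1][j+1], cost[prow][j+1]]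
--       index_min = min(range(len(values)), key=values.__getitem__)
--       if index_min == 0:
--         trow = 0
--       else:
--         if index_min == 1:
--           trow = prow - 1
--         else:
--           trow = prow
--     else:
--       values = [cost[prow-1][j+1],cost[prow][j+1], cost[prow+1][j+1]]
--       index_min = min(range(len(values)), key=values.__getitem__)
--       if index_min == 0:
--         trow = prow - 1
--       else:
--         if index_min == 2:
--           trow = prow + 1
--         else:
--           trow = prow
--
--     path += [trow+1]
--
--   return path
--
-- def memoized_tsp(matrix):
--   cost = [[0 for j in range(len(matrix[0]))] for i in range(len(matrix))]
--
--   for i in range(len(matrix)):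
--     cost[i][len(matrix[0])-1] = matrix[i][len(matrix[0])-1]
--
--   final_cost = 2**31
--   min_row = 0
--   for j in range(len(matrix[0])-2, -1, -1):
--     for i in range(len(matrix)):
--       if i == 0:
--         mc = min(cost[len(matrix)-1][j+1], cost[i][j+1], cost[i+1][j+1]) + matrix[i][j]
--       elif i == len(matrix)-1:
--         mc = min(cost[i-1][j+1], cost[i][j+1], cost[0][j+1]) + matrix[i][j]
--       else:
--         mc = min(cost[i-1][j+1], cost[i][j+1], cost[i+1][j+1]) + matrix[i][j]
--
--       cost[i][j] = mc
--
--       if j == 0 and mc < final_cost: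
--         final_cost = mc
--         min_row = i+1
--
--   path = build_path(min_row, cost)
--   return path, final_cost
-- ===== SOURCE B (Python) =====
-- # B: same right-to-left DP, but keeps only one cost column and records next-row
-- # pointers (with build_path's exact per-row preference order), then reconstructs
-- # the path by walking the pointers instead of re-reading a full cost table.
-- # On single-column matrices B scans the column like any other start column and
-- # returns ([best_row], min_entry) where A returns ([0], 2**31) (see claim).
-- def memoized_tsp(matrix):
--   rows = len(matrix)
--   cols = len(matrix[0])
--   cur = [row[cols - 1] for row in matrix]   # DP costs of column j+1
--   nxt = []                                  # per column: list of (value, best next row)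
--   for j in range(cols - 2, -1, -1):
--     col = []
--     for i in range(rows):
--       if i == 0:
--         c0, c1, c2 = (cur[0], 0), (cur[1], 1), (cur[rows - 1], rows - 1)
--       elif i == rows - 1:
--         c0, c1, c2 = (cur[0], 0), (cur[i - 1], i - 1), (cur[i], i)
--       else:
--         c0, c1, c2 = (cur[i - 1], i - 1), (cur[i], i), (cur[i + 1], i + 1)
--       if c0[0] <= c1[0]:
--         v, r = c0 if c0[0] <= c2[0] else c2
--       else:
--         v, r = c1 if c1[0] <= c2[0] else c2
--       col.append((v + matrix[i][j], r))
--     nxt.append(col)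
--     cur = [v for v, _ in col]
--   final = 2 ** 31
--   start = 0
--   for i in range(rows):
--     if cur[i] < final:
--       final = cur[i]
--       start = i + 1
--   path = [start]
--   r = start - 1
--   for col in reversed(nxt):
--     r = col[r][1]
--     path.append(r + 1)
--   return path, final
-- ===== Notes on version B (the rewrite author's own statement) =====
-- stated objective: alternative
-- what changed: Same right-to-left DP, but B keeps only the current cost column plus a table of next-row pointers recorded with build_path's exact per-row preference order, and reconstructs the path by walking the pointers instead of A's second pass that re-reads the full cost matrix and recomputes argmins; B also treats a single-column matrix like any other start column.
-- intended difference: On single-column matrices A never scans the only column and returns ([0], 2**31) (the untouched sentinel and stale 1-indexed row 0, which is not a valid row), while B returns ([i+1], m) for the first row i attaining the minimal entry m, the intended answer for a one-column path. — e.g. on memoized_tsp([[3], [1]]): A returns ([0], 2147483648), B returns ([2], 1)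
-- outside the precondition, e.g. on memoized_tsp([[2147483648, 0], [0, 2147483648]]): A returns ([2, 1], 0), B returns ([2, 1], 0)
import Mathlib
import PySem

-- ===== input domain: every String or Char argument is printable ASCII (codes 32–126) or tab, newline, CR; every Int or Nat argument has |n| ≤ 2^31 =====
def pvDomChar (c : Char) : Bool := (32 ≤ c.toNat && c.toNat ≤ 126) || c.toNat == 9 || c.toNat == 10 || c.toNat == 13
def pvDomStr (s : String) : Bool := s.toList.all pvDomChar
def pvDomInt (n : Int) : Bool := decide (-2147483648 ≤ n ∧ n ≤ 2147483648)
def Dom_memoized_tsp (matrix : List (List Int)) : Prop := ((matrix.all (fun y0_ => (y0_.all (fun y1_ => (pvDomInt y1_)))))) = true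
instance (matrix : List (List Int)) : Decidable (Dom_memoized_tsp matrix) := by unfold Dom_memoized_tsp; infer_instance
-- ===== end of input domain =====

-- B records next-row pointers (build_path's exact tie-break preferences) during the same
-- right-to-left DP fill, keeping only one cost column, and rebuilds the path by walking the
-- pointers instead of A's second argmin-recomputing pass over the full cost table; on
-- single-column matrices B scans the column like any other (see D_ below).

-- ===== PORT A =====
-- cost[i][j] reads/writes; all indices used inside Pre_ are nonnegative and in range,
-- so .toNat / getD-defaults are exact there (Python's negative wraparound is not modeled).
def pvGet2 (c : List (List Int)) (i j : Nat) : Int := (c.getD i []).getD j 0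

def pvSet2 (c : List (List Int)) (i j : Nat) (v : Int) : List (List Int) :=
  c.set i ((c.getD i []).set j v)

-- min(range(len(values)), key=values.__getitem__)  : first index attaining the minimum
def pvArgmin3 (v0 v1 v2 : Int) : Nat :=
  if v0 ≤ v1 then (if v0 ≤ v2 then 0 else 2) else (if v1 ≤ v2 then 1 else 2)

-- the loop body of build_path computing trow from prow (branches in A's order)
def pvTrow (cost : List (List Int)) (rows : Nat) (prow : Int) (j : Nat) : Int :=
  if prow = 0 then
    let im := pvArgmin3 (pvGet2 cost prow.toNat (j+1)) (pvGet2 cost (prow+1).toNat (j+1))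
      (pvGet2 cost (rows-1) (j+1))
    if im = 2 then (rows : Int) - 1 else prow + (im : Int)
  else if prow = (rows : Int) - 1 then
    let im := pvArgmin3 (pvGet2 cost 0 (j+1)) (pvGet2 cost (prow-1).toNat (j+1))
      (pvGet2 cost prow.toNat (j+1))
    if im = 0 then 0 else if im = 1 then prow - 1 else prow
  else
    let im := pvArgmin3 (pvGet2 cost (prow-1).toNat (j+1)) (pvGet2 cost prow.toNat (j+1))
      (pvGet2 cost (prow+1).toNat (j+1))
    if im = 0 then prow - 1 else if im = 2 then prow + 1 else prow

def build_path (row : Int) (cost : List (List Int)) : List Int :=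
  (List.range ((cost.headD []).length - 1)).foldl
    (fun path j =>
      let prow := path.getLastD 0 - 1
      let trow := pvTrow cost cost.length prow j
      path ++ [trow + 1])
    [row]

-- the inner 'for i in range(len(matrix))' body of the fill
def pvInner (matrix : List (List Int)) (rows : Nat) (j : Nat)
    (st : List (List Int) × Int × Int) (i : Nat) : List (List Int) × Int × Int :=
  let c := st.1
  let mc :=
    (if i = 0 then
        min (min (pvGet2 c (rows - 1) (j + 1)) (pvGet2 c i (j + 1))) (pvGet2 c (i + 1) (j + 1))
      else if i = rows - 1 then
        min (min (pvGet2 c (i - 1) (j + 1)) (pvGet2 c i (j + 1))) (pvGet2 c 0 (j + 1))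
      else
        min (min (pvGet2 c (i - 1) (j + 1)) (pvGet2 c i (j + 1))) (pvGet2 c (i + 1) (j + 1))) +
    pvGet2 matrix i j
  let c' := pvSet2 c i j mc
  if j = 0 ∧ mc < st.2.1 then (c', mc, (i : Int) + 1) else (c', st.2.1, st.2.2)

def memoized_tsp (matrix : List (List Int)) : List Int × Int :=
  let rows := matrix.length
  let cols := (matrix.headD []).length
  let cost0 : List (List Int) := matrix.map (fun _ => List.replicate cols 0)
  let cost1 := (List.range rows).foldl
    (fun c i => pvSet2 c i (cols - 1) (pvGet2 matrix i (cols - 1))) cost0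
  let st := (List.range (cols - 1)).reverse.foldl
    (fun st j => (List.range rows).foldl (pvInner matrix rows j) st)
    (cost1, (2147483648 : Int), (0 : Int))
  (build_path st.2.2 st.1, st.2.1)

-- ===== PORT B =====
-- first-min of the three (value, row) candidates (Source B's chained <= comparisons)
def pvSel3 (c0 c1 c2 : Int × Nat) : Int × Nat :=
  if c0.1 ≤ c1.1 then (if c0.1 ≤ c2.1 then c0 else c2)
  else (if c1.1 ≤ c2.1 then c1 else c2)

-- candidate triple for row i, in build_path's preference order (Source B's three branches)
def pvCand (rows i : Nat) (cur : List Int) : (Int × Nat) × (Int × Nat) × (Int × Nat) :=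
  if i = 0 then ((cur.getD 0 0, 0), (cur.getD 1 0, 1), (cur.getD (rows - 1) 0, rows - 1))
  else if i = rows - 1 then ((cur.getD 0 0, 0), (cur.getD (i - 1) 0, i - 1), (cur.getD i 0, i))
  else ((cur.getD (i - 1) 0, i - 1), (cur.getD i 0, i), (cur.getD (i + 1) 0, i + 1))

def pvPairAt (rows i : Nat) (cur : List Int) : Int × Nat :=
  let c := pvCand rows i cur
  pvSel3 c.1 c.2.1 c.2.2

-- one column step: new (value, next-row) pairs at column j from the costs cur of column j+1
def pvAltStep (matrix : List (List Int)) (rows : Nat)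
    (st : List Int × List (List (Int × Nat))) (j : Nat) : List Int × List (List (Int × Nat)) :=
  let col := (List.range rows).map (fun i =>
    let vr := pvPairAt rows i st.1
    (vr.1 + (matrix.getD i []).getD j 0, vr.2))
  (col.map Prod.fst, st.2 ++ [col])

def pvScanStep (cur : List Int) (fs : Int × Nat) (i : Nat) : Int × Nat :=
  if cur.getD i 0 < fs.1 then (cur.getD i 0, i + 1) else fs

-- Source B's r = start - 1 is Nat subtraction here: start = 0 only outside Pre_ (Python wraps there)
def pvWalkStep (pr : List Int × Nat) (col : List (Int × Nat)) : List Int × Nat :=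
  let r := (col.getD pr.2 (0, 0)).2
  (pr.1 ++ [(r : Int) + 1], r)

def memoized_tsp_alt (matrix : List (List Int)) : List Int × Int :=
  let rows := matrix.length
  let cols := (matrix.headD []).length
  let cur0 : List Int := matrix.map (fun row => row.getD (cols - 1) 0)
  let st := (List.range (cols - 1)).reverse.foldl (pvAltStep matrix rows)
    (cur0, ([] : List (List (Int × Nat))))
  let fs := (List.range rows).foldl (pvScanStep st.1) ((2147483648 : Int), (0 : Nat))
  let walk := st.2.reverse.foldl pvWalkStep ([((fs.2 : Nat) : Int)], fs.2 - 1)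
  (walk.1, fs.1)

-- ===== PRECONDITION & SPEC =====
-- Pre_ admits the natural domain: a nonempty matrix whose rows all reach the width of row 0
-- (a shorter row raises IndexError in A), at least 2 rows unless single-column (rows == 1
-- with ≥ 2 columns raises IndexError at cost[i+1]), and some row of total weight < 2^31:
-- otherwise A's 2**31 sentinel can stay unbeaten, min_row stays 0 and build_path walks
-- negative wrapped indices (or raises) — excluded, A's value there is an accident (see cites).
def Pre_memoized_tsp (matrix : List (List Int)) : Prop :=
  matrix ≠ [] ∧
  0 < (matrix.headD []).length ∧
  (∀ row ∈ matrix, (matrix.headD []).length ≤ row.length) ∧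
  (2 ≤ matrix.length ∨ (matrix.headD []).length = 1) ∧
  (∃ row ∈ matrix, ((row.take (matrix.headD []).length).sum < 2147483648))
instance (matrix : List (List Int)) : Decidable (Pre_memoized_tsp matrix) := by
  unfold Pre_memoized_tsp; infer_instance

def pvWitness_memoized_tsp : List (List Int) := [[1, 2], [3, 4]]

-- On single-column matrices A returns ([0], 2**31) — the untouched sentinel and the stale
-- 1-indexed min_row 0, which is not a valid row — while B returns ([i+1], m) for the first
-- row i attaining the minimal entry m, the intended answer for a one-column path.
def D_memoized_tsp (matrix : List (List Int)) : Prop := matrix.headI.length = 1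
instance (matrix : List (List Int)) : Decidable (D_memoized_tsp matrix) := by
  unfold D_memoized_tsp; infer_instance

def Spec_memoized_tsp (matrix : List (List Int)) (out : List Int × Int) : Prop :=
  ¬ D_memoized_tsp matrix → out = memoized_tsp_alt matrix
instance (matrix : List (List Int)) (out : List Int × Int) :
    Decidable (Spec_memoized_tsp matrix out) := by unfold Spec_memoized_tsp; infer_instance

def pvDiffWitness_memoized_tsp : List (List Int) := [[3], [1]]
def pvDiffWitnessOut_memoized_tsp : (List Int × Int) × (List Int × Int) :=
  (([0], 2147483648), ([2], 1))

-- ===== CLAIM (what is proved, stated in full; the proofs are below) =====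
def Claim_unchanged_memoized_tsp : Prop := ∀ (matrix : List (List Int)),
  Dom_memoized_tsp matrix → Pre_memoized_tsp matrix →
  Spec_memoized_tsp matrix (memoized_tsp matrix)
def Claim_changed_memoized_tsp : Prop :=
  Dom_memoized_tsp (pvDiffWitness_memoized_tsp) ∧ Pre_memoized_tsp (pvDiffWitness_memoized_tsp) ∧
  D_memoized_tsp (pvDiffWitness_memoized_tsp) ∧
  memoized_tsp (pvDiffWitness_memoized_tsp) = pvDiffWitnessOut_memoized_tsp.1 ∧
  memoized_tsp_alt (pvDiffWitness_memoized_tsp) = pvDiffWitnessOut_memoized_tsp.2 ∧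
  pvDiffWitnessOut_memoized_tsp.1 ≠ pvDiffWitnessOut_memoized_tsp.2
def Claim_exact_memoized_tsp : Prop := ∀ (matrix : List (List Int)),
  Dom_memoized_tsp matrix → Pre_memoized_tsp matrix → D_memoized_tsp matrix →
  memoized_tsp matrix ≠ memoized_tsp_alt matrix

-- ===== LEMMAS AND PROOFS =====

-- column q of a cost table
def pvColOf (c : List (List Int)) (q : Nat) : List Int := c.map (fun r => r.getD q 0)

def pvShape (c : List (List Int)) (rows cols : Nat) : Prop :=
  c.length = rows ∧ ∀ r ∈ c, r.length = cols

-- value written by the fill at row i when column j+1 holds d (A's min order)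
def pvVal (rows : Nat) (d : List Int) (i : Nat) : Int :=
  if i = 0 then min (min (d.getD (rows - 1) 0) (d.getD i 0)) (d.getD (i + 1) 0)
  else if i = rows - 1 then min (min (d.getD (i - 1) 0) (d.getD i 0)) (d.getD 0 0)
  else min (min (d.getD (i - 1) 0) (d.getD i 0)) (d.getD (i + 1) 0)

-- pvColK matrix k = DP cost column (cols-1-k)
def pvColK (matrix : List (List Int)) : Nat → List Int
  | 0 => matrix.map (fun row => row.getD ((matrix.headD []).length - 1) 0)
  | (k+1) => (List.range matrix.length).map (fun i =>
      pvVal matrix.length (pvColK matrix k) i +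
      (matrix.getD i []).getD ((matrix.headD []).length - 2 - k) 0)

-- the (value, pointer) column B computes at column cols-2-k
def pvPairK (matrix : List (List Int)) (k : Nat) : List (Int × Nat) :=
  (List.range matrix.length).map (fun i =>
    let vr := pvPairAt matrix.length i (pvColK matrix k)
    (vr.1 + (matrix.getD i []).getD ((matrix.headD []).length - 2 - k) 0, vr.2))

theorem pv_colOf_getD (c : List (List Int)) (q i : Nat) :
    (pvColOf c q).getD i 0 = pvGet2 c i q := by
  simp only [pvColOf, pvGet2, List.getD_eq_getElem?_getD, List.getElem?_map]
  cases hc : getElem? c i <;> simp [hc]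

theorem pv_set_getD_self (l : List Int) (i : Nat) : l.set i (l.getD i 0) = l := by
  by_cases h : i < l.length
  · simp [List.getD_eq_getElem?_getD, List.getElem?_eq_getElem h, List.set_getElem_self]
  · rw [List.set_eq_of_length_le (by omega)]

theorem pv_set_take_succ (l : List Int) (t : Nat) (a : Int) (h : t < l.length) :
    (l.set t a).take (t+1) = l.take t ++ [a] := by
  apply List.ext_getElem?
  intro q
  rcases Nat.lt_trichotomy q t with hq | hq | hq
  · rw [List.getElem?_append_left (by simp; omega)]
    simp only [List.getElem?_take, List.getElem?_set]
    split_ifs <;> first | rfl | omega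
  · subst hq
    rw [List.getElem?_append_right (by simp)]
    have hm : min q l.length = q := by omega
    simp only [List.getElem?_take, List.getElem?_set, List.length_take, hm, Nat.sub_self]
    simp [h]
  · rw [List.getElem?_append_right (by simp; omega)]
    have hm : min t l.length = t := by omega
    simp only [List.getElem?_take, List.getElem?_set, List.length_take, hm]
    have h1 : ¬ q < t + 1 := by omega
    rw [if_neg h1, List.getElem?_eq_none (by simp; omega)]

theorem pv_getD_set_ne (l : List Int) (t q : Nat) (a : Int) (hq : q ≠ t) :
    (l.set t a).getD q 0 = l.getD q 0 := by
  simp only [List.getD_eq_getElem?_getD, List.getElem?_set]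
  split_ifs <;> first | rfl | omega

theorem pv_getD_set_self (l : List Int) (t : Nat) (a : Int) (h : t < l.length) :
    (l.set t a).getD t 0 = a := by
  simp only [List.getD_eq_getElem?_getD, List.getElem?_set]
  split_ifs <;> simp_all

theorem pv_sel_val (rows i : Nat) (d : List Int) :
    (pvPairAt rows i d).1 = pvVal rows d i := by
  unfold pvPairAt pvVal
  by_cases h0 : i = 0
  · subst h0
    simp only [pvCand, if_pos rfl, pvSel3]
    split_ifs <;> simp_all [min_def] <;> omega
  · by_cases hl : i = rows - 1
    · simp only [pvCand, if_neg h0, if_pos hl, pvSel3]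
      split_ifs <;> simp_all [min_def] <;> omega
    · simp only [pvCand, if_neg h0, if_neg hl, pvSel3]
      split_ifs <;> simp_all [min_def] <;> omega

theorem pv_ptr_lt (rows i : Nat) (d : List Int) (h2 : 2 ≤ rows) (hi : i < rows) :
    (pvPairAt rows i d).2 < rows := by
  unfold pvPairAt
  by_cases h0 : i = 0
  · subst h0
    simp only [pvCand, if_pos rfl, pvSel3]
    split_ifs <;> simp_all [min_def] <;> omega
  · by_cases hl : i = rows - 1
    · simp only [pvCand, if_neg h0, if_pos hl, pvSel3]
      split_ifs <;> simp_all [min_def] <;> omega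
    · simp only [pvCand, if_neg h0, if_neg hl, pvSel3]
      split_ifs <;> simp_all [min_def] <;> omega

theorem pv_trow_eq (T : List (List Int)) (rows : Nat) (r j : Nat)
    (h2 : 2 ≤ rows) (hr : r < rows) :
    pvTrow T rows (r : Int) j = ((pvPairAt rows r (pvColOf T (j+1))).2 : Int) := by
  have g : ∀ x : Nat, (pvColOf T (j+1)).getD x 0 = pvGet2 T x (j+1) :=
    fun x => pv_colOf_getD T (j+1) x
  unfold pvTrow pvPairAt pvCand pvSel3 pvArgmin3
  by_cases h0 : r = 0
  · subst h0
    simp only [Int.natCast_zero, g]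
    norm_num
    split_ifs <;> simp_all <;> omega
  · have h0' : (r : Int) ≠ 0 := by exact_mod_cast h0
    by_cases hl : r = rows - 1
    · have hl' : (r : Int) = (rows : Int) - 1 := by omega
      simp only [if_neg h0', if_pos hl', if_neg h0, if_pos hl, g]
      have e1 : ((r : Int) - 1).toNat = r - 1 := by omega
      have e2 : ((r : Int)).toNat = r := by omega
      rw [e1, e2]
      split_ifs <;> simp_all <;> omega
    · have hl' : (r : Int) ≠ (rows : Int) - 1 := by omega
      simp only [if_neg h0', if_neg hl', if_neg h0, if_neg hl, g]
      have e1 : ((r : Int) - 1).toNat = r - 1 := by omega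
      have e2 : ((r : Int)).toNat = r := by omega
      have e3 : ((r : Int) + 1).toNat = r + 1 := by omega
      rw [e1, e2, e3]
      split_ifs <;> simp_all <;> omega

theorem pv_colOf_set_ne (c : List (List Int)) (i j q : Nat) (v : Int) (hq : q ≠ j) :
    pvColOf (pvSet2 c i j v) q = pvColOf c q := by
  by_cases hi : i < c.length
  · unfold pvColOf pvSet2
    rw [List.map_set]
    rw [pv_getD_set_ne _ _ _ _ hq]
    have hrow : (c.getD i []).getD q 0 = (c.map (fun r => r.getD q 0)).getD i 0 := by
      simp [List.getD_eq_getElem?_getD, List.getElem?_eq_getElem hi, List.getElem?_map]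
    rw [hrow, pv_set_getD_self]
  · unfold pvSet2
    rw [List.set_eq_of_length_le (by omega)]

theorem pv_getD_mem (tb : List (List Int)) (i : Nat) (hi : i < tb.length) :
    tb.getD i [] ∈ tb := by
  have : tb.getD i [] = tb.get ⟨i, hi⟩ := by
    simp [List.getD_eq_getElem?_getD, List.getElem?_eq_getElem hi]
  rw [this]
  exact List.get_mem tb ⟨i, hi⟩

theorem pv_colOf_set_self (tb : List (List Int)) (rows cols i j : Nat) (v : Int)
    (hs : pvShape tb rows cols) (hi : i < rows) (hj : j < cols) :
    pvColOf (pvSet2 tb i j v) j = (pvColOf tb j).set i v := by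
  unfold pvColOf pvSet2
  rw [List.map_set]
  congr 1
  have hi' : i < tb.length := by rw [hs.1]; exact hi
  have hlen : (tb.getD i []).length = cols := hs.2 _ (pv_getD_mem tb i hi')
  exact pv_getD_set_self _ _ _ (by omega)

theorem pv_shape_set2 (tb : List (List Int)) (rows cols i j : Nat) (v : Int)
    (hs : pvShape tb rows cols) (hi : i < rows) :
    pvShape (pvSet2 tb i j v) rows cols := by
  constructor
  · simp [pvSet2, hs.1]
  · intro r hr
    rcases List.mem_or_eq_of_mem_set hr with h | h
    · exact hs.2 _ h
    · subst h
      have hi' : i < tb.length := by rw [hs.1]; exact hi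
      have hl := hs.2 _ (pv_getD_mem tb i hi')
      simp only [List.length_set]
      simpa [List.getD_eq_getElem?_getD] using hl

-- the value A's fill writes at row i of column j, column j+1 holding d
def pvF (matrix : List (List Int)) (rows j : Nat) (d : List Int) (i : Nat) : Int :=
  pvVal rows d i + pvGet2 matrix i j

theorem pv_inner_decomp (matrix : List (List Int)) (rows j : Nat) (d : List Int) :
    ∀ (l : List Nat) (c : List (List Int)) (p : Int × Int), pvColOf c (j+1) = d →
    l.foldl (pvInner matrix rows j) (c, p) =
      (l.foldl (fun c i => pvSet2 c i j (pvF matrix rows j d i)) c,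
       l.foldl (fun p i =>
         if j = 0 ∧ pvF matrix rows j d i < p.1 then (pvF matrix rows j d i, (i:Int)+1) else p) p) := by
  intro l
  induction l with
  | nil => intro c p _; rfl
  | cons a as ih =>
    intro c p hc
    have g : ∀ x : Nat, pvGet2 c x (j+1) = d.getD x 0 := by
      intro x; rw [← pv_colOf_getD, hc]
    have hstep : pvInner matrix rows j (c, p) a =
        (pvSet2 c a j (pvF matrix rows j d a),
         if j = 0 ∧ pvF matrix rows j d a < p.1 then (pvF matrix rows j d a, (a:Int)+1) else p) := by
      simp only [pvInner, pvF, pvVal, g]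
      split_ifs <;> simp_all
    simp only [List.foldl_cons, hstep]
    rw [ih _ _ (by rw [pv_colOf_set_ne _ _ _ _ _ (by omega), hc])]

theorem pv_foldl_set_range' (f : Nat → Int) :
    ∀ (n t : Nat) (l : List Int), l.length = t + n →
    (List.range' t n).foldl (fun l i => l.set i (f i)) l = l.take t ++ (List.range' t n).map f := by
  intro n
  induction n with
  | zero =>
    intro t l h
    rw [List.range'_zero]
    simp [List.take_of_length_le (show l.length ≤ t by omega)]
  | succ n ih =>
    intro t l h
    rw [List.range'_succ, List.foldl_cons, List.map_cons]
    rw [ih (t+1) (l.set t (f t)) (by simp; omega)]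
    rw [pv_set_take_succ _ _ _ (by omega)]
    simp

theorem pv_foldl_set_range (f : Nat → Int) (n : Nat) (l : List Int) (h : l.length = n) :
    (List.range n).foldl (fun l i => l.set i (f i)) l = (List.range n).map f := by
  rw [List.range_eq_range', pv_foldl_set_range' f n 0 l (by omega)]
  simp [List.range_eq_range']

theorem pv_scan_const (j : Nat) (hj : j ≠ 0) (F : Nat → Int) :
    ∀ (l : List Nat) (p : Int × Int),
    l.foldl (fun p i => if j = 0 ∧ F i < p.1 then (F i, (i:Int)+1) else p) p = p := by
  intro l
  induction l with
  | nil => intro p; rfl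
  | cons a as ih => intro p; simp [hj, ih]

theorem pv_map_range_getD {α β : Type} (g : α → β) (d : α) :
    ∀ (l : List α), (List.range l.length).map (fun i => g (l.getD i d)) = l.map g := by
  intro l
  induction l with
  | nil => rfl
  | cons a as ih =>
    simp only [List.length_cons, List.range_succ_eq_map, List.map_cons, List.map_map]
    simp only [List.getD_cons_zero, List.getD_cons_succ]
    rw [← ih]
    rfl

theorem pv_getD_map_range {b : Type} (f : Nat → b) (d : b) (n r : Nat) (hr : r < n) :
    ((List.range n).map f).getD r d = f r := by
  simp [List.getD_eq_getElem?_getD, List.getElem?_map, List.getElem?_range, hr]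

theorem pv_getD_map (l : List (List Int)) (g : List Int → Int) (i : Nat) (hi : i < l.length) :
    (l.map g).getD i 0 = g (l.getD i []) := by
  simp [List.getD_eq_getElem?_getD, List.getElem?_map, List.getElem?_eq_getElem hi]

-- combined invariant of a fold writing column j0 at rows l
theorem pv_foldl_set2_inv (rows cols j0 : Nat) (G : Nat → Int) (hj0 : j0 < cols) :
    ∀ (l : List Nat) (c : List (List Int)), pvShape c rows cols → (∀ i ∈ l, i < rows) →
    pvShape (l.foldl (fun c i => pvSet2 c i j0 (G i)) c) rows cols ∧
    (∀ q, q ≠ j0 → pvColOf (l.foldl (fun c i => pvSet2 c i j0 (G i)) c) q = pvColOf c q) ∧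
    pvColOf (l.foldl (fun c i => pvSet2 c i j0 (G i)) c) j0 =
      l.foldl (fun col i => col.set i (G i)) (pvColOf c j0) := by
  intro l
  induction l with
  | nil => intro c hs _; exact ⟨hs, fun _ _ => rfl, rfl⟩
  | cons a as ih =>
    intro c hs hmem
    have ha : a < rows := hmem a (by simp)
    have hs' := pv_shape_set2 c rows cols a j0 (G a) hs ha
    obtain ⟨s1, s2, s3⟩ := ih (pvSet2 c a j0 (G a)) hs' (fun i hi => hmem i (by simp [hi]))
    refine ⟨s1, ?_, ?_⟩
    · intro q hq
      rw [List.foldl_cons, s2 q hq, pv_colOf_set_ne _ _ _ _ _ hq]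
    · rw [List.foldl_cons, s3, pv_colOf_set_self c rows cols a j0 (G a) hs ha hj0]
      rfl

theorem pv_colK_succ (matrix : List (List Int)) (k : Nat) :
    pvColK matrix (k+1) = (pvPairK matrix k).map Prod.fst := by
  simp only [pvColK, pvPairK, List.map_map]
  apply List.map_congr_left
  intro i _
  simp [pv_sel_val]

-- B's outer fold, processed columns m-1 … 0
theorem pv_alt_fold (matrix : List (List Int)) :
    ∀ (m : Nat), m ≤ (matrix.headD []).length - 1 →
    ∀ (acc : List (List (Int × Nat))),
    (List.range m).reverse.foldl (pvAltStep matrix matrix.length)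
        (pvColK matrix ((matrix.headD []).length - 1 - m), acc) =
      (pvColK matrix ((matrix.headD []).length - 1),
       acc ++ (List.range m).reverse.map (fun j => pvPairK matrix ((matrix.headD []).length - 2 - j))) := by
  intro m
  induction m with
  | zero => intro _ acc; simp
  | succ m ih =>
    intro hm acc
    set cols := (matrix.headD []).length with hcols
    have hstep : pvAltStep matrix matrix.length (pvColK matrix (cols - 1 - (m+1)), acc) m =
        (pvColK matrix (cols - 1 - m), acc ++ [pvPairK matrix (cols - 2 - m)]) := by
      have hk : cols - 1 - (m+1) = cols - 2 - m := by omega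
      have hj : cols - 2 - (cols - 2 - m) = m := by omega
      simp only [pvAltStep, hk]
      simp only [Prod.mk.injEq]
      constructor
      · have : cols - 1 - m = (cols - 2 - m) + 1 := by omega
        rw [this, pv_colK_succ]
        congr 1
        simp only [pvPairK]; rw [← hcols]; simp only [hj]
      · congr 1
        simp only [pvPairK]; rw [← hcols]; simp only [hj]
    rw [List.range_succ, List.reverse_append, List.reverse_singleton]
    simp only [List.singleton_append, List.foldl_cons]
    rw [hstep, ih (by omega) (acc ++ [pvPairK matrix (cols - 2 - m)])]
    simp

-- A's scan of column 0 as it appears inside the fill at j = 0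
def pvScanA (col : List Int) (rows : Nat) (p : Int × Int) : Int × Int :=
  (List.range rows).foldl
    (fun p i => if col.getD i 0 < p.1 then (col.getD i 0, (i:Int)+1) else p) p

-- A's outer fold over columns m-1 … 0
theorem pv_outer_fold (matrix : List (List Int)) (h2 : 2 ≤ matrix.length)
    (hc2 : 2 ≤ (matrix.headD []).length) :
    ∀ (m : Nat), m ≤ (matrix.headD []).length - 1 →
    ∀ (c : List (List Int)) (p : Int × Int),
    pvShape c matrix.length (matrix.headD []).length →
    pvColOf c m = pvColK matrix ((matrix.headD []).length - 1 - m) →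
    pvShape ((List.range m).reverse.foldl
        (fun st j => (List.range matrix.length).foldl (pvInner matrix matrix.length j) st)
        (c, p)).1 matrix.length (matrix.headD []).length ∧
    (∀ q, m ≤ q → pvColOf ((List.range m).reverse.foldl
        (fun st j => (List.range matrix.length).foldl (pvInner matrix matrix.length j) st)
        (c, p)).1 q = pvColOf c q) ∧
    (∀ q, q < m → pvColOf ((List.range m).reverse.foldl
        (fun st j => (List.range matrix.length).foldl (pvInner matrix matrix.length j) st)
        (c, p)).1 q = pvColK matrix ((matrix.headD []).length - 1 - q)) ∧
    ((List.range m).reverse.foldl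
        (fun st j => (List.range matrix.length).foldl (pvInner matrix matrix.length j) st)
        (c, p)).2 =
      (if 0 < m then pvScanA (pvColK matrix ((matrix.headD []).length - 1)) matrix.length p
       else p) := by
  intro m
  induction m with
  | zero =>
    intro _ c p hs hcol
    exact ⟨hs, fun _ _ => rfl, fun q hq => absurd hq (by omega), by simp⟩
  | succ m ih =>
    intro hm c p hs hcol
    set rows := matrix.length with hrows
    set cols := (matrix.headD []).length with hcols
    have hmc : m < cols - 1 := by omega
    set d := pvColK matrix (cols - 1 - (m+1)) with hd
    set F := pvF matrix rows m d with hF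
    have hdec := pv_inner_decomp matrix rows m d (List.range rows) c p hcol
    set C1 := (List.range rows).foldl (fun c i => pvSet2 c i m (F i)) c with hC1
    set P1 := (List.range rows).foldl
      (fun p i => if m = 0 ∧ F i < p.1 then (F i, (i:Int)+1) else p) p with hP1
    obtain ⟨i1, i2, i3⟩ := pv_foldl_set2_inv rows cols m F (by omega) (List.range rows) c hs
      (fun i hi => by simpa using hi)
    have hlen : (pvColOf c m).length = rows := by simp [pvColOf, hs.1]
    have hmapF : (List.range rows).map F = pvColK matrix (cols - 1 - m) := by
      have h1 : cols - 1 - m = (cols - 1 - (m+1)) + 1 := by omega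
      have h2 : cols - 2 - (cols - 1 - (m+1)) = m := by omega
      rw [h1]
      simp only [pvColK]
      rw [← hcols, ← hrows, h2]
      apply List.map_congr_left
      intro i _
      rfl
    have hcolC1 : pvColOf C1 m = pvColK matrix (cols - 1 - m) := by
      rw [hC1, i3, pv_foldl_set_range F rows (pvColOf c m) hlen, hmapF]
    obtain ⟨o1, o2, o3, o4⟩ := ih (by omega) C1 P1 i1 hcolC1
    have hsplit : (List.range (m+1)).reverse.foldl
        (fun st j => (List.range rows).foldl (pvInner matrix rows j) st) (c, p) =
        (List.range m).reverse.foldl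
        (fun st j => (List.range rows).foldl (pvInner matrix rows j) st) (C1, P1) := by
      rw [List.range_succ, List.reverse_append, List.reverse_singleton]
      simp only [List.singleton_append, List.foldl_cons]
      rw [hdec]
    rw [hsplit]
    refine ⟨o1, ?_, ?_, ?_⟩
    · intro q hq
      rw [o2 q (by omega), i2 q (by omega)]
    · intro q hq
      rcases Nat.lt_or_ge q m with h | h
      · exact o3 q h
      · have hq' : q = m := by omega
        subst hq'
        rw [o2 q (le_refl q), hcolC1]
    · rw [o4]
      by_cases hm0 : m = 0
      · subst hm0
        simp only [Nat.lt_irrefl, if_neg (lt_irrefl 0), if_pos (Nat.zero_lt_one)]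
        rw [hP1]
        unfold pvScanA
        apply PySem.List.foldl_congr_mem
        intro acc x hx
        have hx' : x < rows := by simpa using hx
        have : (pvColK matrix (cols - 1)).getD x 0 = F x := by
          have : cols - 1 - 0 = cols - 1 := by omega
          rw [← this, ← hmapF, pv_getD_map_range F 0 rows x hx']
        rw [this]
        simp
      · have hP1p : P1 = p := by
          rw [hP1]
          exact pv_scan_const m hm0 F (List.range rows) p
        rw [hP1p, if_pos (by omega), if_pos (by omega)]

theorem pv_scanAB (col : List Int) :
    ∀ (l : List Nat) (a : Int) (s : Nat),
    l.foldl (fun p i => if col.getD i 0 < p.1 then (col.getD i 0, (i:Int)+1) else p) (a, (s:Int)) =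
      ((l.foldl (pvScanStep col) (a, s)).1, ((l.foldl (pvScanStep col) (a, s)).2 : Int)) := by
  intro l
  induction l with
  | nil => intro a s; rfl
  | cons x xs ih =>
    intro a s
    simp only [List.foldl_cons, pvScanStep]
    by_cases h : col.getD x 0 < a
    · rw [if_pos h, if_pos h]
      have : ((x:Int) + 1) = (((x + 1 : Nat)) : Int) := by push_cast; ring
      rw [this, ih]
    · rw [if_neg h, if_neg h, ih]

theorem pv_scanB_snd_le (col : List Int) (rows : Nat) :
    ∀ (l : List Nat) (p : Int × Nat), (∀ i ∈ l, i + 1 ≤ rows) → p.2 ≤ rows →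
    (l.foldl (pvScanStep col) p).2 ≤ rows := by
  intro l
  induction l with
  | nil => intro p _ hp; exact hp
  | cons x xs ih =>
    intro p hmem hp
    simp only [List.foldl_cons, pvScanStep]
    split_ifs
    · exact ih _ (fun i hi => hmem i (by simp [hi])) (hmem x (by simp))
    · exact ih _ (fun i hi => hmem i (by simp [hi])) hp

theorem pv_scanB_fst_le (col : List Int) :
    ∀ (l : List Nat) (p : Int × Nat), (l.foldl (pvScanStep col) p).1 ≤ p.1 := by
  intro l
  induction l with
  | nil => intro p; exact le_refl _
  | cons x xs ih =>
    intro p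
    simp only [List.foldl_cons, pvScanStep]
    split_ifs with h
    · exact le_trans (ih _) (le_of_lt h)
    · exact ih _

theorem pv_scanB_fst_le_mem (col : List Int) :
    ∀ (l : List Nat) (p : Int × Nat) (i : Nat), i ∈ l →
    (l.foldl (pvScanStep col) p).1 ≤ col.getD i 0 := by
  intro l
  induction l with
  | nil => intro p i hi; simp at hi
  | cons x xs ih =>
    intro p i hi
    simp only [List.foldl_cons]
    rcases List.mem_cons.mp hi with h | h
    · subst h
      have h1 := pv_scanB_fst_le col xs (pvScanStep col p i)
      have h2 : (pvScanStep col p i).1 ≤ col.getD i 0 := by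
        simp only [pvScanStep]
        split_ifs with h
        · exact le_refl _
        · exact not_lt.mp h
      exact le_trans h1 h2
    · exact ih _ i h

theorem pv_scanB_snd_zero (col : List Int) :
    ∀ (l : List Nat) (p : Int × Nat), (l.foldl (pvScanStep col) p).2 = 0 → p.2 = 0 := by
  intro l
  induction l with
  | nil => intro p h; exact h
  | cons x xs ih =>
    intro p h
    simp only [List.foldl_cons] at h
    have hthis := ih _ h
    by_cases hc : col.getD x 0 < p.1
    · have he : pvScanStep col p x = (col.getD x 0, x + 1) := by
        unfold pvScanStep; rw [if_pos hc]
      rw [he] at hthis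
      simp at hthis
    · have he : pvScanStep col p x = p := by
        unfold pvScanStep; rw [if_neg hc]
      rw [he] at hthis
      exact hthis

theorem pv_scanB_fst_of_zero (col : List Int) :
    ∀ (l : List Nat) (p : Int × Nat), (l.foldl (pvScanStep col) p).2 = 0 →
    (l.foldl (pvScanStep col) p).1 = p.1 := by
  intro l
  induction l with
  | nil => intro p _; rfl
  | cons x xs ih =>
    intro p h
    simp only [List.foldl_cons] at h ⊢
    have hz := pv_scanB_snd_zero col xs _ h
    by_cases hc : col.getD x 0 < p.1
    · have he : pvScanStep col p x = (col.getD x 0, x + 1) := by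
        unfold pvScanStep; rw [if_pos hc]
      rw [he] at hz
      simp at hz
    · have he : pvScanStep col p x = p := by
        unfold pvScanStep; rw [if_neg hc]
      rw [he] at h ⊢
      exact ih _ h

theorem pv_scan_pos (col : List Int) (rows : Nat)
    (h : ∃ i, i < rows ∧ col.getD i 0 < 2147483648) :
    1 ≤ ((List.range rows).foldl (pvScanStep col) (2147483648, 0)).2 ∧
    ((List.range rows).foldl (pvScanStep col) (2147483648, 0)).2 ≤ rows := by
  obtain ⟨i, hi, hlt⟩ := h
  constructor
  · by_contra hc
    have hz : ((List.range rows).foldl (pvScanStep col) (2147483648, 0)).2 = 0 := by omega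
    have h1 := pv_scanB_fst_of_zero col (List.range rows) (2147483648, 0) hz
    have h2 := pv_scanB_fst_le_mem col (List.range rows) (2147483648, 0) i (by simpa using hi)
    omega
  · exact pv_scanB_snd_le col rows (List.range rows) (2147483648, 0)
      (fun x hx => by simp at hx; omega) (by simp)

theorem pv_val_le (rows : Nat) (d : List Int) (i : Nat) : pvVal rows d i ≤ d.getD i 0 := by
  unfold pvVal
  split_ifs <;>
    exact le_trans (min_le_left _ _) (min_le_right _ _)

theorem pv_take_getElem_getD (l : List Int) (m idx : Nat) (h : idx < (l.take m).length)
    (h2 : idx < l.length) : (l.take m)[idx]'h = l.getD idx 0 := by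
  rw [List.getD_eq_getElem?_getD, List.getElem?_eq_getElem h2]
  exact List.getElem_take

theorem pv_colK_le (matrix : List (List Int))
    (hrect : ∀ row ∈ matrix, (matrix.headD []).length ≤ row.length)
    (hc1 : 1 ≤ (matrix.headD []).length) :
    ∀ k, k ≤ (matrix.headD []).length - 1 → ∀ i, i < matrix.length →
    (pvColK matrix k).getD i 0 ≤
      (((matrix.getD i []).take (matrix.headD []).length).drop
        ((matrix.headD []).length - 1 - k)).sum := by
  set cols := (matrix.headD []).length with hcols
  intro k
  induction k with
  | zero =>
    intro _ i hi
    have hrow : cols ≤ (matrix.getD i []).length := hrect _ (pv_getD_mem matrix i hi)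
    have hlen : ((matrix.getD i []).take cols).length = cols := by
      rw [List.length_take]; omega
    have hidx : cols - 1 - 0 < ((matrix.getD i []).take cols).length := by
      rw [hlen]; omega
    rw [List.drop_eq_getElem_cons hidx]
    rw [List.drop_eq_nil_of_le (by omega)]
    have hget : ((matrix.getD i []).take cols)[cols - 1 - 0]'hidx =
        (matrix.getD i []).getD (cols - 1) 0 := by
      exact pv_take_getElem_getD _ _ _ hidx (by omega)
    have hcol0 : (pvColK matrix 0).getD i 0 = (matrix.getD i []).getD (cols - 1) 0 := by
      simp only [pvColK]
      rw [pv_getD_map matrix _ i hi]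
    rw [hcol0, hget]
    simp
  | succ k ih =>
    intro hk i hi
    have hrow : cols ≤ (matrix.getD i []).length := hrect _ (pv_getD_mem matrix i hi)
    have hlen : ((matrix.getD i []).take cols).length = cols := by
      rw [List.length_take]; omega
    have hgetk : (pvColK matrix (k+1)).getD i 0 =
        pvVal matrix.length (pvColK matrix k) i + (matrix.getD i []).getD (cols - 2 - k) 0 := by
      simp only [pvColK]
      rw [← hcols, pv_getD_map_range _ 0 matrix.length i hi]
    have hidx : cols - 1 - (k+1) < ((matrix.getD i []).take cols).length := by
      rw [hlen]; omega
    rw [hgetk, List.drop_eq_getElem_cons hidx, List.sum_cons]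
    have he : cols - 1 - (k+1) + 1 = cols - 1 - k := by omega
    rw [he]
    have hget : ((matrix.getD i []).take cols)[cols - 1 - (k+1)]'hidx =
        (matrix.getD i []).getD (cols - 2 - k) 0 := by
      have h1 : cols - 1 - (k+1) = cols - 2 - k := by omega
      simp only [h1]
      exact pv_take_getElem_getD _ _ _ (by rw [hlen]; omega) (by omega)
    rw [hget]
    have h2 := ih (by omega) i hi
    have h3 := pv_val_le matrix.length (pvColK matrix k) i
    omega

theorem pv_headD_mem (l : List (List Int)) (h : l ≠ []) : l.headD [] ∈ l := by
  cases l with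
  | nil => exact absurd rfl h
  | cons a as => simp

theorem pv_walk (matrix T : List (List Int)) (h2 : 2 ≤ matrix.length)
    (hcolT : ∀ j, j < (matrix.headD []).length - 1 →
      pvColOf T (j+1) = pvColK matrix ((matrix.headD []).length - 2 - j)) :
    ∀ (n t : Nat), t + n = (matrix.headD []).length - 1 →
    ∀ (path : List Int) (r : Nat), r < matrix.length → path.getLastD 0 = (r : Int) + 1 →
    (List.range' t n).foldl (fun path j =>
        let prow := path.getLastD 0 - 1
        let trow := pvTrow T matrix.length prow j
        path ++ [trow + 1]) path =
      ((List.range' t n).foldl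
        (fun pr j => pvWalkStep pr (pvPairK matrix ((matrix.headD []).length - 2 - j)))
        (path, r)).1 := by
  intro n
  induction n with
  | zero => intro t _ path r _ _; rfl
  | succ n ih =>
    intro t ht path r hr hlast
    set cols := (matrix.headD []).length with hcols
    rw [List.range'_succ, List.foldl_cons, List.foldl_cons]
    dsimp only
    have hprow : path.getLastD 0 - 1 = (r : Int) := by rw [hlast]; ring
    have htrow : pvTrow T matrix.length (path.getLastD 0 - 1) t =
        ((pvPairAt matrix.length r (pvColK matrix (cols - 2 - t))).2 : Int) := by
      rw [hprow, pv_trow_eq T matrix.length r t h2 hr, hcolT t (by omega)]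
    have hgetp : (pvPairK matrix (cols - 2 - t)).getD r (0, 0) =
        ((pvPairAt matrix.length r (pvColK matrix (cols - 2 - t))).1 +
          (matrix.getD r []).getD (cols - 2 - (cols - 2 - t)) 0,
         (pvPairAt matrix.length r (pvColK matrix (cols - 2 - t))).2) := by
      rw [pvPairK, pv_getD_map_range _ (0, 0) matrix.length r hr]
    have hstepB : pvWalkStep (path, r) (pvPairK matrix (cols - 2 - t)) =
        (path ++ [((pvPairAt matrix.length r (pvColK matrix (cols - 2 - t))).2 : Int) + 1],
         (pvPairAt matrix.length r (pvColK matrix (cols - 2 - t))).2) := by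
      rw [pvWalkStep, hgetp]
    rw [hstepB, htrow]
    exact ih (t+1) (by omega)
      (path ++ [((pvPairAt matrix.length r (pvColK matrix (cols - 2 - t))).2 : Int) + 1])
      (pvPairAt matrix.length r (pvColK matrix (cols - 2 - t))).2
      (pv_ptr_lt matrix.length r (pvColK matrix (cols - 2 - t)) h2 hr)
      List.getLastD_concat

theorem pv_cost1 (matrix : List (List Int)) (hc1 : 1 ≤ (matrix.headD []).length) :
    pvShape ((List.range matrix.length).foldl
      (fun c i => pvSet2 c i ((matrix.headD []).length - 1)
        (pvGet2 matrix i ((matrix.headD []).length - 1)))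
      (matrix.map (fun _ => List.replicate (matrix.headD []).length 0)))
      matrix.length (matrix.headD []).length ∧
    pvColOf ((List.range matrix.length).foldl
      (fun c i => pvSet2 c i ((matrix.headD []).length - 1)
        (pvGet2 matrix i ((matrix.headD []).length - 1)))
      (matrix.map (fun _ => List.replicate (matrix.headD []).length 0)))
      ((matrix.headD []).length - 1) = pvColK matrix 0 := by
  set cols := (matrix.headD []).length with hcols
  set cost0 := matrix.map (fun _ => List.replicate cols (0 : Int)) with hcost0
  have hs0 : pvShape cost0 matrix.length cols := by
    constructor
    · simp [hcost0]
    · intro r hr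
      rw [hcost0] at hr
      obtain ⟨x, _, hx⟩ := List.mem_map.mp hr
      simp [← hx]
  obtain ⟨i1, i2, i3⟩ := pv_foldl_set2_inv matrix.length cols (cols - 1)
    (fun i => pvGet2 matrix i (cols - 1)) (by omega) (List.range matrix.length) cost0 hs0
    (fun i hi => by simpa using hi)
  refine ⟨i1, ?_⟩
  rw [i3, pv_foldl_set_range _ matrix.length _ (by simp [pvColOf, hs0.1])]
  have := pv_map_range_getD (fun row => row.getD (cols - 1) 0) ([] : List Int) matrix
  rw [pvColK, ← hcols, ← this]
  rfl

-- the common value both ports compute (cols ≥ 2)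
def pvColZ (matrix : List (List Int)) : List Int :=
  pvColK matrix ((matrix.headD []).length - 1)
def pvFS (matrix : List (List Int)) : Int × Nat :=
  (List.range matrix.length).foldl (pvScanStep (pvColZ matrix)) (2147483648, 0)
def pvPath (matrix : List (List Int)) : List Int :=
  ((List.range ((matrix.headD []).length - 1)).foldl
    (fun pr j => pvWalkStep pr (pvPairK matrix ((matrix.headD []).length - 2 - j)))
    ([((pvFS matrix).2 : Int)], (pvFS matrix).2 - 1)).1

theorem pv_col_lt (matrix : List (List Int))
    (hrect : ∀ row ∈ matrix, (matrix.headD []).length ≤ row.length)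
    (hc1 : 1 ≤ (matrix.headD []).length)
    (hsum : ∃ row ∈ matrix, ((row.take (matrix.headD []).length).sum < 2147483648)) :
    ∃ i, i < matrix.length ∧ (pvColZ matrix).getD i 0 < 2147483648 := by
  obtain ⟨row, hmem, hslt⟩ := hsum
  obtain ⟨i, hi, hieq⟩ := List.getElem_of_mem hmem
  have hgd : matrix.getD i [] = row := by
    simp [List.getD_eq_getElem?_getD, List.getElem?_eq_getElem hi, hieq]
  refine ⟨i, hi, ?_⟩
  have hb := pv_colK_le matrix hrect hc1 ((matrix.headD []).length - 1) (le_refl _) i hi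
  rw [hgd] at hb
  have hz : (matrix.headD []).length - 1 - ((matrix.headD []).length - 1) = 0 := by omega
  rw [hz, List.drop_zero] at hb
  unfold pvColZ
  omega

theorem pv_A_value (matrix : List (List Int))
    (hne : matrix ≠ [])
    (hrect : ∀ row ∈ matrix, (matrix.headD []).length ≤ row.length)
    (h2 : 2 ≤ matrix.length) (hc2 : 2 ≤ (matrix.headD []).length)
    (hsum : ∃ row ∈ matrix, ((row.take (matrix.headD []).length).sum < 2147483648)) :
    memoized_tsp matrix = (pvPath matrix, (pvFS matrix).1) := by
  obtain ⟨hf1, hf2⟩ := pv_scan_pos (pvColZ matrix) matrix.length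
    (pv_col_lt matrix hrect (by omega) hsum)
  have hf1' : 1 ≤ (pvFS matrix).2 := hf1
  have hf2' : (pvFS matrix).2 ≤ matrix.length := hf2
  clear hf1 hf2
  simp only [memoized_tsp]
  obtain ⟨hs1, hcol1⟩ := pv_cost1 matrix (by omega)
  have hcolX : pvColOf ((List.range matrix.length).foldl
      (fun c i => pvSet2 c i ((matrix.headD []).length - 1)
        (pvGet2 matrix i ((matrix.headD []).length - 1)))
      (matrix.map (fun _ => List.replicate (matrix.headD []).length 0)))
      ((matrix.headD []).length - 1) =
      pvColK matrix ((matrix.headD []).length - 1 - ((matrix.headD []).length - 1)) := by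
    have hz : (matrix.headD []).length - 1 - ((matrix.headD []).length - 1) = 0 := by omega
    rw [hz]; exact hcol1
  obtain ⟨o1, o2, o3, o4⟩ := pv_outer_fold matrix h2 hc2 ((matrix.headD []).length - 1)
    (le_refl _) _ (2147483648, 0) hs1 hcolX
  set ST := (List.range ((matrix.headD []).length - 1)).reverse.foldl
      (fun st j => (List.range matrix.length).foldl (pvInner matrix matrix.length j) st)
      ((List.range matrix.length).foldl
        (fun c i => pvSet2 c i ((matrix.headD []).length - 1)
          (pvGet2 matrix i ((matrix.headD []).length - 1)))
        (matrix.map (fun _ => List.replicate (matrix.headD []).length 0)),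
       ((2147483648 : Int), (0 : Int))) with hST
  have hP : ST.2 = ((pvFS matrix).1, ((pvFS matrix).2 : Int)) := by
    rw [o4, if_pos (by omega)]
    unfold pvScanA pvFS pvColZ
    simpa using pv_scanAB (pvColK matrix ((matrix.headD []).length - 1))
      (List.range matrix.length) 2147483648 0
  have hTlen : ST.1.length = matrix.length := o1.1
  have hTne : ST.1 ≠ [] := by
    intro hc; rw [hc] at hTlen; simp at hTlen; omega
  have hTh : (ST.1.headD []).length = (matrix.headD []).length :=
    o1.2 _ (pv_headD_mem ST.1 hTne)
  have hcolT : ∀ j, j < (matrix.headD []).length - 1 →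
      pvColOf ST.1 (j+1) = pvColK matrix ((matrix.headD []).length - 2 - j) := by
    intro j hj
    rcases Nat.lt_or_ge (j+1) ((matrix.headD []).length - 1) with h | h
    · rw [o3 (j+1) h]
      congr 1
      omega
    · have hj1 : j + 1 = (matrix.headD []).length - 1 := by omega
      rw [o2 (j+1) (by omega), hj1, hcolX]
      congr 1
      omega
  have hpath : build_path ST.2.2 ST.1 = pvPath matrix := by
    rw [hP]
    unfold build_path pvPath
    simp only [hTh, hTlen]
    rw [List.range_eq_range']
    exact pv_walk matrix ST.1 h2 hcolT ((matrix.headD []).length - 1) 0 (by omega)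
      _ ((pvFS matrix).2 - 1) (by omega)
      (by simp; omega)
  rw [hpath, hP]

theorem pv_B_value (matrix : List (List Int)) (hc2 : 2 ≤ (matrix.headD []).length) :
    memoized_tsp_alt matrix = (pvPath matrix, (pvFS matrix).1) := by
  simp only [memoized_tsp_alt]
  have halt := pv_alt_fold matrix ((matrix.headD []).length - 1) (le_refl _) []
  have hz : (matrix.headD []).length - 1 - ((matrix.headD []).length - 1) = 0 := by omega
  rw [hz] at halt
  have hcur0 : (matrix.map (fun row => row.getD ((matrix.headD []).length - 1) 0)) =
      pvColK matrix 0 := rfl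
  rw [hcur0, halt]
  simp only [List.nil_append]
  have hrev : ((List.range ((matrix.headD []).length - 1)).reverse.map
      (fun j => pvPairK matrix ((matrix.headD []).length - 2 - j))).reverse =
      (List.range ((matrix.headD []).length - 1)).map
      (fun j => pvPairK matrix ((matrix.headD []).length - 2 - j)) := by
    simp
  rw [hrev, List.foldl_map]
  rfl

-- headI (used by D_) and headD (used by the ports) coincide on List (List Int)
theorem pv_headI_headD (l : List (List Int)) : l.headI.length = (l.headD []).length := by
  cases l <;> rfl

theorem memoized_tsp_spec : Claim_unchanged_memoized_tsp := by
  unfold Claim_unchanged_memoized_tsp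
  intro matrix _ hpre
  unfold Spec_memoized_tsp
  intro hnd
  unfold D_memoized_tsp at hnd
  rw [pv_headI_headD] at hnd
  obtain ⟨hne, hc1, hrect, hr2, hsum⟩ := hpre
  have hc2 : 2 ≤ (matrix.headD []).length := by omega
  have h2 : 2 ≤ matrix.length := by
    rcases hr2 with h | h
    · exact h
    · omega
  rw [pv_A_value matrix hne hrect h2 hc2 hsum, pv_B_value matrix hc2]

theorem memoized_tsp_tight : Claim_exact_memoized_tsp := by
  unfold Claim_exact_memoized_tsp
  intro matrix _ hpre hD
  obtain ⟨hne, hc1, hrect, hr2, hsum⟩ := hpre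
  unfold D_memoized_tsp at hD
  rw [pv_headI_headD] at hD
  have hrows1 : 1 ≤ matrix.length := by
    cases matrix with
    | nil => exact absurd rfl hne
    | cons a as => simp
  obtain ⟨hs1, _⟩ := pv_cost1 matrix (by omega)
  have hA : memoized_tsp matrix = ([0], 2147483648) := by
    simp only [memoized_tsp, hD, Nat.sub_self, List.range_zero, List.reverse_nil,
      List.foldl_nil]
    simp only [hD, Nat.sub_self] at hs1
    have hc1ne : (List.foldl (fun c i => pvSet2 c i 0 (pvGet2 matrix i 0))
        (List.map (fun _ => List.replicate 1 (0 : Int)) matrix)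
        (List.range matrix.length)) ≠ [] := by
      intro hc
      have hl := hs1.1
      rw [hc] at hl
      simp at hl
      omega
    have hhl : ((List.foldl (fun c i => pvSet2 c i 0 (pvGet2 matrix i 0))
        (List.map (fun _ => List.replicate 1 (0 : Int)) matrix)
        (List.range matrix.length)).headD []).length = 1 :=
      hs1.2 _ (pv_headD_mem _ hc1ne)
    unfold build_path
    rw [hhl]
    simp
  have hex := pv_col_lt matrix hrect (by omega) hsum
  obtain ⟨hf1, hf2⟩ := pv_scan_pos (pvColZ matrix) matrix.length hex
  have hcz : pvColZ matrix = List.map (fun row => row.getD 0 0) matrix := by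
    simp only [pvColZ, hD, Nat.sub_self, pvColK]
  have hB : memoized_tsp_alt matrix = ([((pvFS matrix).2 : Int)], (pvFS matrix).1) := by
    simp only [memoized_tsp_alt, hD, Nat.sub_self, List.range_zero, List.reverse_nil,
      List.foldl_nil]
    simp only [pvFS, hcz]
  rw [hA, hB]
  intro hc
  rw [Prod.ext_iff] at hc
  simp at hc
  have hf1' : 1 ≤ (pvFS matrix).2 := hf1
  omega

-- ===== VERDICT =====
theorem memoized_tsp_changed : Claim_changed_memoized_tsp := by
  unfold Claim_changed_memoized_tsp; decide
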